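-- pv_equiv track=rewrite | github.com/Chaaany/SSafy_15_BESTTEAM | 20240703/백준/윤병찬_S4_14469_소가_길을_건너간_이유_3.py | calc_min_time
-- ===== SOURCE A (Python) =====
-- def calc_min_time(n, arrivals, inspections):
--     cows = [(arrivals[i], inspections[i]) for i in range(n)]
--     cows.sort()
--
--     current_time = 0
--
--     for arrival, inspection in cows:
--         if current_time < arrival:
--             current_time = arrival
--         current_time += inspection
--
--     return current_time
-- ===== SOURCE B (Python) =====
-- def calc_min_time(n, arrivals, inspections):
--     cows = sorted((arrivals[i], inspections[i]) for i in range(n))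
--     suffix = 0   # total inspection time from this cow to the end
--     best = None  # max over processed cows of arrival + remaining inspection work
--     for arrival, inspection in reversed(cows):
--         suffix += inspection
--         cand = arrival + suffix
--         if best is None or cand > best:
--             best = cand
--     return suffix if best is None else max(suffix, best)
-- ===== Notes on version B (the rewrite author's own statement) =====
-- stated objective: alternative
-- what changed: Replaces A's left-to-right simulation of the queue (clock raised to each arrival, then advanced by the inspection) with a single right-to-left pass computing suffix sums of inspection times and returning the scheduling closed form max(total work, max_i(arrival_i + remaining work from i)).
import Mathlib
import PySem

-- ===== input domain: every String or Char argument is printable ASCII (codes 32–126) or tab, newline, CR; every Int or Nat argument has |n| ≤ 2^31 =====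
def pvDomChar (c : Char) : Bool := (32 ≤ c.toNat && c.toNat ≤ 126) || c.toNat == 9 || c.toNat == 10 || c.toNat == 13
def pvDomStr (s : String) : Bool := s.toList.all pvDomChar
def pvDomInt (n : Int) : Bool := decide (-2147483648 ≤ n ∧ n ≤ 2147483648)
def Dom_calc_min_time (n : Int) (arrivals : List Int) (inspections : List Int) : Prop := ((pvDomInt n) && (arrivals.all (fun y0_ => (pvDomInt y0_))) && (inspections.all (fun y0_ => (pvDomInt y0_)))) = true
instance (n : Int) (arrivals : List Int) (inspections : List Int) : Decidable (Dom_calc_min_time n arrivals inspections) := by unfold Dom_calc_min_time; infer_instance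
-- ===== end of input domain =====

-- B replaces A's left-to-right clock simulation by a right-to-left suffix-sum pass returning
-- max(total work, max_i(arrival_i + remaining work)) — an alternative decomposition, same cost.


-- ===== PORT A =====
-- cows = [(arrivals[i], inspections[i]) for i in range(n)]; cows.sort(); then the left-to-right
-- clock loop.  pyGetD's default 0 is never used inside Pre_ (every index is in range).
def calc_min_time (n : Int) (arrivals : List Int) (inspections : List Int) : Int :=
  let cows := PySem.List.sorted2
    ((PySem.List.pyRange 0 n 1).map
      (fun i => (PySem.List.pyGetD arrivals i 0, PySem.List.pyGetD inspections i 0)))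
    Prod.fst Prod.snd false
  cows.foldl (fun current_time p =>
    (if current_time < p.1 then p.1 else current_time) + p.2) 0

-- ===== PORT B =====
-- Same sorted cow list; then a reversed pass (foldr) maintaining (suffix, best), and
-- 'suffix if best is None else max(suffix, best)'.
-- The body of B's reversed loop (suffix += inspection; cand = arrival + suffix; update best).
def pvBStep (p : Int × Int) (st : Int × Option Int) : Int × Option Int :=
  let suffix := st.1 + p.2
  let cand := p.1 + suffix
  (suffix, match st.2 with
           | none => some cand
           | some best => some (if cand > best then cand else best))

def calc_min_time_alt (n : Int) (arrivals : List Int) (inspections : List Int) : Int :=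
  let cows := PySem.List.sorted2
    ((PySem.List.pyRange 0 n 1).map
      (fun i => (PySem.List.pyGetD arrivals i 0, PySem.List.pyGetD inspections i 0)))
    Prod.fst Prod.snd false
  let st := cows.foldr pvBStep (0, none)
  match st.2 with
  | none => st.1
  | some best => max st.1 best

-- ===== PRECONDITION & SPEC =====
-- Pre_ excludes exactly the inputs where Python A raises IndexError: some index in range(n)
-- is out of range of arrivals or inspections.
def Pre_calc_min_time (n : Int) (arrivals : List Int) (inspections : List Int) : Prop :=
  n ≤ (arrivals.length : Int) ∧ n ≤ (inspections.length : Int)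
instance (n : Int) (arrivals : List Int) (inspections : List Int) : Decidable (Pre_calc_min_time n arrivals inspections) := by unfold Pre_calc_min_time; infer_instance
def pvWitness_calc_min_time : Int × List Int × List Int := (2, ([3, 1], [2, 4]))
def Spec_calc_min_time (n : Int) (arrivals : List Int) (inspections : List Int) (out : Int) : Prop := out = calc_min_time_alt n arrivals inspections
instance (n : Int) (arrivals : List Int) (inspections : List Int) (out : Int) : Decidable (Spec_calc_min_time n arrivals inspections out) := by unfold Spec_calc_min_time; infer_instance

-- ===== CLAIM (what is proved, stated in full; the proofs are below) =====
def Claim_equal_calc_min_time : Prop := ∀ (n : Int) (arrivals : List Int) (inspections : List Int), Dom_calc_min_time n arrivals inspections → Pre_calc_min_time n arrivals inspections → Spec_calc_min_time n arrivals inspections (calc_min_time n arrivals inspections)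

-- ===== LEMMAS AND PROOFS =====

-- Core identity: for ANY list of (arrival, inspection) pairs and any start time t, A's
-- left-to-right clock loop equals t + (suffix sum), maxed with B's best when it exists.
theorem pv_fold_eq (L : List (Int × Int)) (t : Int) :
    L.foldl (fun ct p => (if ct < p.1 then p.1 else ct) + p.2) t =
      (match (L.foldr pvBStep (0, none)).2 with
       | none => t + (L.foldr pvBStep (0, none)).1
       | some best => max (t + (L.foldr pvBStep (0, none)).1) best) := by
  induction L generalizing t with
  | nil => simp
  | cons p L ih =>
    obtain ⟨a, b⟩ := p
    simp only [List.foldl_cons, List.foldr_cons, pvBStep]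
    rw [ih]
    rcases h : (L.foldr pvBStep (0, none)).2 with _ | best <;>
      simp only [h, max_def] <;>
      generalize (List.foldr pvBStep (0, none) L).1 = s <;>
      split_ifs <;> linarith

-- ===== VERDICT (by name: the statement is the Claim_ definition above) =====
theorem calc_min_time_spec : Claim_equal_calc_min_time := by
  intro n arrivals inspections _ _
  unfold Spec_calc_min_time calc_min_time calc_min_time_alt
  simp only []
  rw [pv_fold_eq]
  rcases h : ((PySem.List.sorted2
      ((PySem.List.pyRange 0 n 1).map
        (fun i => (PySem.List.pyGetD arrivals i 0, PySem.List.pyGetD inspections i 0)))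
      Prod.fst Prod.snd false).foldr pvBStep (0, none)).2 with _ | best <;>
    simp [h]
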